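-- pv_equiv track=rewrite | github.com/Ridepad/uwu-logs | WarmaneBossFights/group_by_raids.py | combine_instance_data_by_result_code
-- ===== SOURCE A (Python) =====
-- def get_result_code(wipes, reports):
--     if wipes + 1 == reports:
--         return 0
--     elif wipes == reports:
--         return 1
--     elif wipes > reports:
--         return 2
--     else: # if wipes < reports:
--         return 3
--
-- def combine_instance_data_by_result_code(instance_data_all: list[dict[str, set]]):
--     combined_instance_data: dict[int, list[dict]] = {}
--     for instance_data in instance_data_all:
--         max_wipes = max(instance_data['wipes'])
--         len_reports = len(instance_data['reports'])
--         result_code = get_result_code(max_wipes, len_reports)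
--         combined_instance_data.setdefault(result_code, []).append(instance_data)
--
--     combined_instance_data = dict(sorted(combined_instance_data.items()))
--     return combined_instance_data
-- ===== SOURCE B (Python) =====
-- def get_result_code(wipes, reports):
--     if wipes + 1 == reports:
--         return 0
--     elif wipes == reports:
--         return 1
--     elif wipes > reports:
--         return 2
--     else:
--         return 3
--
--
-- def combine_instance_data_by_result_code(instance_data_all: list[dict[str, set]]):
--     # One pass to tag each instance with its result code, then one bucket scan
--     # per possible code (there are only 4), in ascending order: no dict
--     # mutation, no sort.
--     keyed = [(get_result_code(max(d['wipes']), len(d['reports'])), d)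
--              for d in instance_data_all]
--     return {c: g for c in range(4) if (g := [d for k, d in keyed if k == c])}
-- ===== Notes on version B (the rewrite author's own statement) =====
-- stated objective: simpler
-- what changed: Replaces the setdefault-into-dict loop followed by sorting the dict items with a single tagging pass plus one bucket scan per fixed result code 0..3 emitted in ascending order, so no dict mutation and no sort is needed.
import Mathlib
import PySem

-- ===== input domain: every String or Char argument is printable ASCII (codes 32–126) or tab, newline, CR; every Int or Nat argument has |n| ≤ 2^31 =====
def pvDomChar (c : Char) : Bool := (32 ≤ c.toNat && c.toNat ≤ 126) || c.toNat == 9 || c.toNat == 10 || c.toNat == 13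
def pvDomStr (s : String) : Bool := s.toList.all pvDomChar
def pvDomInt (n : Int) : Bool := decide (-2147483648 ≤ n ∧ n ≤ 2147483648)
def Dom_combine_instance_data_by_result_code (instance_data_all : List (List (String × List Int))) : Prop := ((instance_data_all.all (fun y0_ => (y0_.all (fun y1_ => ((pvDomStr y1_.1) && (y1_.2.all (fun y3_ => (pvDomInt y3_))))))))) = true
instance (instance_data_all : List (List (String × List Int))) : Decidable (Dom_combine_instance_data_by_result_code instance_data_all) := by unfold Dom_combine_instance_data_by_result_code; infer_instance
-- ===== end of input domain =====

-- B replaces A's setdefault-dict loop + sort of the items by a tagging pass and one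
-- bucket scan per fixed result code 0..3 (already in ascending order); objective: simpler.

-- ===== PORT A =====
def get_result_code (wipes reports : Int) : Int :=
  if wipes + 1 = reports then 0
  else if wipes = reports then 1
  else if wipes > reports then 2
  else 3

-- max_wipes = max(instance_data['wipes']); len_reports = len(instance_data['reports']).
-- Missing key / empty 'wipes' is a KeyError/ValueError in Python: those inputs are outside
-- Pre_, the '.getD' defaults are never reached there. Both Pythons compute this identically.
def rcOf (d : List (String × List Int)) : Int :=
  get_result_code
    ((PySem.List.max? (((PySem.Dict.mk d).get? "wipes").getD []) (fun x => x)).getD 0)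
    ((((PySem.Dict.mk d).get? "reports").getD []).length : Int)

def combine_instance_data_by_result_code (instance_data_all : List (List (String × List Int))) : List (Int × List (List (String × List Int))) :=
  -- the loop: combined.setdefault(result_code, []).append(instance_data)
  --           ==  combined[rc] = combined.get(rc, []) + [instance_data]
  -- then dict(sorted(combined.items())): keys are distinct ints, so the tuple sort orders by key
  PySem.List.sorted
    (instance_data_all.foldl
      (fun acc d => acc.modify (rcOf d) [] (fun l => l ++ [d]))
      (PySem.Dict.empty : PySem.Dict Int (List (List (String × List Int))))).items
    (fun p => p.1)

-- ===== PORT B =====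
def combine_instance_data_by_result_code_alt (instance_data_all : List (List (String × List Int))) : List (Int × List (List (String × List Int))) :=
  let keyed := instance_data_all.map (fun d => (rcOf d, d))
  (PySem.List.pyRange 0 4).filterMap (fun c =>
    let g := (keyed.filter (fun p => p.1 == c)).map (fun p => p.2)
    if g.isEmpty then none else some (c, g))

-- ===== PRECONDITION & SPEC =====
-- Pre_ excludes exactly the inputs where the Python raises: an instance dict whose first
-- 'wipes' entry is missing or empty (ValueError from max / KeyError) or with no 'reports' key.
def Pre_combine_instance_data_by_result_code (instance_data_all : List (List (String × List Int))) : Prop :=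
  ∀ d ∈ instance_data_all,
    ((PySem.Dict.mk d).get? "wipes").getD [] ≠ [] ∧
    (((PySem.Dict.mk d).get? "reports").isSome = true)
instance (instance_data_all : List (List (String × List Int))) : Decidable (Pre_combine_instance_data_by_result_code instance_data_all) := by unfold Pre_combine_instance_data_by_result_code; infer_instance
def pvWitness_combine_instance_data_by_result_code : (List (List (String × List Int))) :=
  [[("wipes", [1]), ("reports", [1, 2])], [("wipes", [0, 3]), ("reports", [7])]]

def Spec_combine_instance_data_by_result_code (instance_data_all : List (List (String × List Int))) (out : List (Int × List (List (String × List Int)))) : Prop := out = combine_instance_data_by_result_code_alt instance_data_all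
instance (instance_data_all : List (List (String × List Int))) (out : List (Int × List (List (String × List Int)))) : Decidable (Spec_combine_instance_data_by_result_code instance_data_all out) := by unfold Spec_combine_instance_data_by_result_code; infer_instance

-- ===== CLAIM (what is proved, stated in full; the proofs are below) =====
def Claim_equal_combine_instance_data_by_result_code : Prop := ∀ (instance_data_all : List (List (String × List Int))), Dom_combine_instance_data_by_result_code instance_data_all → Pre_combine_instance_data_by_result_code instance_data_all → Spec_combine_instance_data_by_result_code instance_data_all (combine_instance_data_by_result_code instance_data_all)

-- ===== LEMMAS AND PROOFS =====

theorem rc_mem (d : List (String × List Int)) : rcOf d ∈ ([0, 1, 2, 3] : List Int) := by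
  unfold rcOf get_result_code
  split_ifs <;> simp

theorem filterMap_ite {α β : Type} (q : α → Bool) (g : α → β) (l : List α) :
    l.filterMap (fun c => if q c then none else some (g c)) =
      (l.filter (fun c => !q c)).map g := by
  induction l with
  | nil => rfl
  | cons a t ih =>
    by_cases h : q a = true <;>
      simp [h, ih]

-- the group of a code, as B computes it
def grp (instance_data_all : List (List (String × List Int))) (c : Int) : List (List (String × List Int)) :=
  ((instance_data_all.map (fun d => (rcOf d, d))).filter (fun p => p.1 == c)).map (fun p => p.2)

theorem grp_nonempty_iff (xs : List (List (String × List Int))) (c : Int) :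
    (!(grp xs c).isEmpty) = decide (c ∈ xs.map rcOf) := by
  unfold grp
  by_cases h : c ∈ xs.map rcOf
  · simp only [h, decide_true, Bool.not_eq_true', List.isEmpty_eq_false_iff_exists_mem]
    rcases List.mem_map.mp h with ⟨d, hd, hc⟩
    exact ⟨d, List.mem_map.mpr ⟨(rcOf d, d),
      List.mem_filter.mpr ⟨List.mem_map.mpr ⟨d, hd, rfl⟩, by simp [hc]⟩, rfl⟩⟩
  · simp only [h, decide_false, Bool.not_eq_false', List.isEmpty_iff, List.map_eq_nil_iff,
      List.filter_eq_nil_iff]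
    intro p hm
    rcases List.mem_map.mp hm with ⟨d0, hd0, rfl⟩
    simp only [beq_iff_eq]
    exact fun hc => h (List.mem_map.mpr ⟨d0, hd0, hc⟩)

theorem b_eq_canonical (xs : List (List (String × List Int))) :
    combine_instance_data_by_result_code_alt xs =
      (([0, 1, 2, 3] : List Int).filter (fun c => decide (c ∈ xs.map rcOf))).map
        (fun c => (c, grp xs c)) := by
  unfold combine_instance_data_by_result_code_alt
  have hr : PySem.List.pyRange 0 4 = ([0, 1, 2, 3] : List Int) := by decide
  rw [hr]
  have := filterMap_ite (fun c => (grp xs c).isEmpty) (fun c => (c, grp xs c))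
    ([0, 1, 2, 3] : List Int)
  simp only [grp] at this
  rw [this]
  congr 1
  exact List.filter_congr (fun c _ => by simpa [grp] using grp_nonempty_iff xs c)

theorem a_items (xs : List (List (String × List Int))) :
    (xs.foldl (fun acc d => acc.modify (rcOf d) [] (fun l => l ++ [d]))
        (PySem.Dict.empty : PySem.Dict Int (List (List (String × List Int))))).items =
      (PySem.Set.ofList (xs.map rcOf)).map (fun c => (c, grp xs c)) := by
  set D := xs.foldl (fun acc d => acc.modify (rcOf d) [] (fun l => l ++ [d]))
    (PySem.Dict.empty : PySem.Dict Int (List (List (String × List Int)))) with hD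
  have hnd : D.keys.Nodup := by
    rw [hD]
    exact PySem.Dict.nodup_keys_foldl_modify_key xs rcOf [] (fun _ x l => l ++ [x]) _
      PySem.Dict.nodup_keys_empty
  have hkeys : D.keys = PySem.Set.ofList (xs.map rcOf) := by
    rw [hD, PySem.Dict.keys_foldl_modify_key xs rcOf [] (fun _ x l => l ++ [x])]
    simpa using PySem.Set.update_nil_left (xs.map rcOf)
  have hgetD : ∀ c, D.getD c [] = grp xs c := by
    intro c
    have hfold : D = (xs.map (fun d => (rcOf d, d))).foldl
        (fun acc p => acc.modify p.1 [] (fun l => l ++ [p.2])) PySem.Dict.empty := by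
      rw [hD, List.foldl_map]
    rw [hfold]
    have := PySem.Dict.getD_foldl_modify_append (xs.map (fun d => (rcOf d, d)))
      (PySem.Dict.empty : PySem.Dict Int (List (List (String × List Int)))) c
    simpa [grp] using this
  rw [PySem.Dict.items_eq_map_keys D hnd [], hkeys]
  exact List.map_congr_left (fun c _ => by rw [hgetD])

theorem a_eq_b (xs : List (List (String × List Int))) :
    combine_instance_data_by_result_code xs = combine_instance_data_by_result_code_alt xs := by
  unfold combine_instance_data_by_result_code
  rw [a_items xs, b_eq_canonical xs]
  apply PySem.List.sorted_eq_of_perm_of_pairwise_lt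
  · -- the bucket list is a permutation of the dict's items
    apply List.Perm.map
    rw [List.perm_ext_iff_of_nodup
      (List.Nodup.filter _ (by decide)) (PySem.Set.nodup_ofList _)]
    intro c
    simp only [List.mem_filter, PySem.Set.mem_ofList, decide_eq_true_eq]
    constructor
    · rintro ⟨_, h⟩; exact h
    · intro h
      refine ⟨?_, h⟩
      rcases List.mem_map.mp h with ⟨d, _, hc⟩
      exact hc ▸ rc_mem d
  · -- strictly increasing keys: a filter of [0,1,2,3]
    rw [List.pairwise_map]
    exact List.Pairwise.filter _ (by decide : ([0,1,2,3] : List Int).Pairwise (· < ·))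

-- ===== VERDICT (by name: the statement is the Claim_ definition above) =====
theorem combine_instance_data_by_result_code_spec : Claim_equal_combine_instance_data_by_result_code := by
  intro xs _ _
  exact a_eq_b xs
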